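-- pv_equiv track=rewrite | github.com/jvhaa/CCC-Canadian-Computing-Competition | J5/CCC '23 J5 - CCC Word Hunt.py | retpath
-- ===== SOURCE A (Python) =====
-- def neg_recip(coords):
--     return ((coords[1]*-1, coords[0]), (coords[1], coords[0]*-1))
--
-- def retpath(paths):
--     rpaths = []
--     for path in paths:
--         diff = []
--         for i in range(len(path)-1):
--             diff.append((path[i+1][0] - path[i][0], path[i+1][1] - path[i][1]))
--         diffs = 0
--         if len(diff) - 1 < 1:
--             rpaths.extend(paths)
--             break
--         for i in range(len(diff)-1):
--             if diff[i] != diff[i+1]: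
--                 diffs += 1
--                 if diff[i] not in neg_recip(diff[i+1]):
--                     break
--             if diffs < 2 and i == len(diff)-2:
--                 rpaths.append(path)
--     return rpaths
-- ===== SOURCE B (Python) =====
-- def neg_recip(coords):
--     return ((coords[1]*-1, coords[0]), (coords[1], coords[0]*-1))
--
-- def retpath(paths):
--     out = []
--     for path in paths:
--         diffs = [(x2 - x1, y2 - y1) for (x1, y1), (x2, y2) in zip(path, path[1:])]
--         if len(diffs) < 2:
--             return out + paths
--         runs = []
--         for d in diffs:
--             if not runs or runs[-1] != d:
--                 runs.append(d)
--         if len(runs) == 1 or (len(runs) == 2 and runs[0] in neg_recip(runs[1])):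
--             out.append(path)
--     return out
-- ===== Notes on version B (the rewrite author's own statement) =====
-- stated objective: alternative
-- what changed: Replaces the index-based pairwise scan with change counter and mid-loop breaks by collapsing the consecutive difference vectors into maximal runs of equal direction and accepting a path iff it has one run, or two runs meeting at a right angle; the short-path case returns out + paths directly instead of extend-and-break.
import Mathlib
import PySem

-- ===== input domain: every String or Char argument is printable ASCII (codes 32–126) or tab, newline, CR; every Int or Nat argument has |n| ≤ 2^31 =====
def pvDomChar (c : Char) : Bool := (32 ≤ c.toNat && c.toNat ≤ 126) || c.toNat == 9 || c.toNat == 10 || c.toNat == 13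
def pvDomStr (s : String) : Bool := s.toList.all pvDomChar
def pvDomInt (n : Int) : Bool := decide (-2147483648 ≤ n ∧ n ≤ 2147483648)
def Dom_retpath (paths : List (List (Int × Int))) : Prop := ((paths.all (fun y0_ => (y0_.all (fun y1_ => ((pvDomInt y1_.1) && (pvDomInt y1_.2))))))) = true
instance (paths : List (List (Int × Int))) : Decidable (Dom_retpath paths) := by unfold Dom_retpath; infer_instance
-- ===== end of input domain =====

-- B rewrites A's pairwise index scan (change counter + mid-loop breaks) as a run-collapse of the
-- difference vectors: accept iff one run, or two runs meeting at a right angle (objective: alternative).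

-- ===== PORT A =====
def negRecip (c : Int × Int) : (Int × Int) × (Int × Int) :=
  ((c.2 * -1, c.1), (c.2, c.1 * -1))

-- path[i] (index always in range in A's loops; default never used)
def pgetA (xs : List (Int × Int)) (i : Int) : Int × Int :=
  (PySem.List.pyGet? xs i).getD (0, 0)

-- for i in range(len(path)-1): diff.append(path[i+1]-path[i])
def buildDiff (path : List (Int × Int)) : List (Int × Int) :=
  (PySem.List.pyRange 0 ((path.length : Int) - 1) 1).foldl
    (fun d i =>
      d ++ [((pgetA path (i + 1)).1 - (pgetA path i).1,
             (pgetA path (i + 1)).2 - (pgetA path i).2)]) []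

-- inner 'for i in range(len(diff)-1)' with the change counter, break, and append flag
def innerA (diff : List (Int × Int)) : List Int → Int → Bool → Bool
  | [], _, app => app
  | i :: rest, diffs, app =>
    if pgetA diff i ≠ pgetA diff (i + 1) then
      if pgetA diff i ≠ (negRecip (pgetA diff (i + 1))).1 ∧
         pgetA diff i ≠ (negRecip (pgetA diff (i + 1))).2 then
        app  -- break
      else
        innerA diff rest (diffs + 1)
          (if diffs + 1 < 2 ∧ i = (diff.length : Int) - 2 then true else app)
    else
      innerA diff rest diffs
        (if diffs < 2 ∧ i = (diff.length : Int) - 2 then true else app)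

-- outer 'for path in paths' with rpaths accumulator; extend(paths)+break returns early
def goA (paths0 : List (List (Int × Int))) :
    List (List (Int × Int)) → List (List (Int × Int)) → List (List (Int × Int))
  | [], rpaths => rpaths
  | path :: rest, rpaths =>
    let diff := buildDiff path
    if (diff.length : Int) - 1 < 1 then rpaths ++ paths0
    else
      let app := innerA diff (PySem.List.pyRange 0 ((diff.length : Int) - 1) 1) 0 false
      goA paths0 rest (if app then rpaths ++ [path] else rpaths)

def retpath (paths : List (List (Int × Int))) : List (List (Int × Int)) :=
  goA paths paths []

-- ===== PORT B =====
-- diffs = [(x2-x1, y2-y1) for (x1,y1),(x2,y2) in zip(path, path[1:])]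
def diffsB (path : List (Int × Int)) : List (Int × Int) :=
  (path.zip (path.drop 1)).map (fun p => (p.2.1 - p.1.1, p.2.2 - p.1.2))

-- runs: collapse adjacent equal diffs (the manual run loop of Source B)
def runsB (diffs : List (Int × Int)) : List (Int × Int) :=
  diffs.foldl (fun rs d => if rs = [] ∨ rs.getLast? ≠ some d then rs ++ [d] else rs) []

def goB (paths0 : List (List (Int × Int))) :
    List (List (Int × Int)) → List (List (Int × Int)) → List (List (Int × Int))
  | [], out => out
  | path :: rest, out =>
    let diffs := diffsB path
    if diffs.length < 2 then out ++ paths0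
    else
      let runs := runsB diffs
      if runs.length = 1 ∨
          (runs.length = 2 ∧
            (runs.getD 0 (0, 0) = (negRecip (runs.getD 1 (0, 0))).1 ∨
             runs.getD 0 (0, 0) = (negRecip (runs.getD 1 (0, 0))).2)) then
        goB paths0 rest (out ++ [path])
      else goB paths0 rest out

def retpath_alt (paths : List (List (Int × Int))) : List (List (Int × Int)) :=
  goB paths paths []

-- ===== PRECONDITION & SPEC =====
def Spec_retpath (paths : List (List (Int × Int))) (out : List (List (Int × Int))) : Prop := out = retpath_alt paths
instance (paths : List (List (Int × Int))) (out : List (List (Int × Int))) : Decidable (Spec_retpath paths out) := by unfold Spec_retpath; infer_instance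

-- ===== CLAIM (what is proved, stated in full; the proofs are below) =====
def Claim_equal_retpath : Prop := ∀ (paths : List (List (Int × Int))), Dom_retpath paths → Spec_retpath paths (retpath paths)

-- ===== LEMMAS AND PROOFS =====

-- structural form of A's inner loop: cur = diff[i], the list argument is diff[i+1:]
def loopC : (Int × Int) → List (Int × Int) → Int → Bool → Bool
  | _, [], _, app => app
  | cur, x :: xs, diffs, app =>
    if cur ≠ x then
      if cur ≠ (negRecip x).1 ∧ cur ≠ (negRecip x).2 then app
      else loopC x xs (diffs + 1) (if diffs + 1 < 2 ∧ xs = [] then true else app)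
    else loopC x xs diffs (if diffs < 2 ∧ xs = [] then true else app)

-- adjacent dedup: the runs after a first element
def dedup : (Int × Int) → List (Int × Int) → List (Int × Int)
  | _, [] => []
  | d, x :: xs => if x = d then dedup d xs else x :: dedup x xs

theorem runs_foldl (ds : List (Int × Int)) :
    ∀ (rs : List (Int × Int)) (d : Int × Int),
      ds.foldl (fun rs d => if rs = [] ∨ rs.getLast? ≠ some d then rs ++ [d] else rs) (rs ++ [d])
        = rs ++ d :: dedup d ds := by
  induction ds with
  | nil => intro rs d; simp [dedup]
  | cons x xs ih =>
    intro rs d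
    by_cases h : x = d
    · subst h
      simp only [List.foldl_cons, List.getLast?_concat, dedup]
      rw [if_neg (by simp)]
      exact ih rs x
    · simp only [List.foldl_cons, List.getLast?_concat, dedup, if_neg h]
      rw [if_pos (by simp; exact fun e => h e.symm)]
      have := ih (rs ++ [d]) x
      simpa using this

theorem runsB_cons (d : Int × Int) (ds : List (Int × Int)) :
    runsB (d :: ds) = d :: dedup d ds := by
  have := runs_foldl ds [] d
  simpa [runsB] using this
theorem pgetA_natCast (xs : List (Int × Int)) (k : Nat) (hk : k < xs.length) :
    pgetA xs (k : Int) = xs[k] := by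
  simp [pgetA, PySem.List.pyGet?_natCast, List.getElem?_eq_getElem hk]

theorem diff_eq (path : List (Int × Int)) : buildDiff path = diffsB path := by
  unfold buildDiff diffsB
  rw [PySem.List.foldl_append_singleton_eq_map, PySem.List.pyRange_one]
  simp only [List.nil_append, List.map_map]
  apply List.ext_getElem
  · simp [List.length_zip]
  · intro k h1 h2
    simp only [List.getElem_map, List.getElem_range, Function.comp_apply, List.getElem_zip,
      List.getElem_drop]
    have hk : k < path.length - 1 := by
      simp at h1; omega
    simp only [zero_add]
    have e2 : (k : Int) + 1 = (((k + 1 : Nat)) : Int) := by push_cast; ring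
    rw [e2, pgetA_natCast path k (by omega), pgetA_natCast path (k+1) (by omega)]
    simp [Nat.add_comm]
theorem pgetA_append_length (pre : List (Int × Int)) (y : Int × Int) (ys : List (Int × Int)) :
    pgetA (pre ++ y :: ys) (pre.length : Int) = y := by
  simp [pgetA, PySem.List.pyGet?_append_length]

theorem innerA_eq_loopC (tail : List (Int × Int)) :
    ∀ (pre : List (Int × Int)) (cur : Int × Int) (diffs : Int) (app : Bool),
      innerA (pre ++ cur :: tail)
        (PySem.List.pyRange (pre.length : Int) ((pre.length : Int) + (tail.length : Int)) 1)
        diffs app = loopC cur tail diffs app := by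
  induction tail with
  | nil =>
    intro pre cur diffs app
    rw [show ((List.nil (α := Int × Int)).length : Int) = 0 by simp,
        add_zero, PySem.List.pyRange_one_eq_nil le_rfl]
    simp [innerA, loopC]
  | cons x xs ih =>
    intro pre cur diffs app
    have hab : (pre.length : Int) < (pre.length : Int) + ((x :: xs).length : Int) := by
      simp only [List.length_cons]; push_cast; omega
    rw [PySem.List.pyRange_one_cons hab]
    have g1 : pgetA (pre ++ cur :: x :: xs) (pre.length : Int) = cur :=
      pgetA_append_length pre cur (x :: xs)
    have g2 : pgetA (pre ++ cur :: x :: xs) ((pre.length : Int) + 1) = x := by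
      have e1 : pre ++ cur :: x :: xs = (pre ++ [cur]) ++ x :: xs := by simp
      have e2 : ((pre.length : Int) + 1) = (((pre ++ [cur]).length : Nat) : Int) := by simp
      rw [e1, e2, pgetA_append_length]
    have hc : ((pre.length : Int) = (((pre ++ cur :: x :: xs).length : Nat) : Int) - 2) ↔ xs = [] := by
      have hl : (pre ++ cur :: x :: xs).length = pre.length + xs.length + 2 := by
        simp [List.length_append]; omega
      rw [hl]
      constructor
      · intro h
        have : xs.length = 0 := by push_cast at h; omega
        exact List.eq_nil_of_length_eq_zero this
      · intro h; subst h; push_cast; simp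
    have ihx : ∀ (d : Int) (a : Bool),
        innerA (pre ++ cur :: x :: xs)
          (PySem.List.pyRange ((pre.length : Int) + 1)
            ((pre.length : Int) + ((x :: xs).length : Int)) 1) d a = loopC x xs d a := by
      intro d a
      have e1 : pre ++ cur :: x :: xs = (pre ++ [cur]) ++ x :: xs := by simp
      have e2 : ((pre.length : Int) + 1) = (((pre ++ [cur]).length : Nat) : Int) := by simp
      have e3 : ((pre.length : Int) + ((x :: xs).length : Int)) =
          (((pre ++ [cur]).length : Nat) : Int) + ((xs.length : Nat) : Int) := by
        simp only [List.length_nil, List.length_append, List.length_cons]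
        push_cast; ring
      rw [e1, e2, e3]
      exact ih (pre ++ [cur]) x d a
    simp only [innerA, loopC, g1, g2, hc, ihx]
theorem loopC_two (tail : List (Int × Int)) :
    ∀ (cur : Int × Int) (d : Int), 2 ≤ d → loopC cur tail d false = false := by
  induction tail with
  | nil => intro cur d _; simp [loopC]
  | cons x xs ih =>
    intro cur d hd
    simp only [loopC]
    have h1 : ¬ (d + 1 < 2 ∧ xs = []) := by omega
    have h2 : ¬ (d < 2 ∧ xs = []) := by omega
    rw [if_neg h1, if_neg h2]
    split_ifs with hne hperp
    · rfl
    · exact ih x (d + 1) (by omega)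
    · exact ih x d hd

theorem loopC_one (tail : List (Int × Int)) :
    ∀ (cur : Int × Int), loopC cur tail 1 (decide (tail = [])) = decide (dedup cur tail = []) := by
  induction tail with
  | nil => intro cur; simp [loopC, dedup]
  | cons x xs ih =>
    intro cur
    have happ1 : (if (1:Int) < 2 ∧ xs = [] then true else decide (x :: xs = [])) = decide (xs = []) := by
      split_ifs with h
      · simp [h.2]
      · have hne : xs ≠ [] := fun hh => h ⟨by norm_num, hh⟩
        simp [hne]
    have happ2 : (if (1:Int) + 1 < 2 ∧ xs = [] then true else decide (x :: xs = [])) = false := by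
      rw [if_neg (by omega ∘ And.left)]
      simp
    simp only [loopC]
    rw [happ1, happ2]
    by_cases hx : cur = x
    · rw [if_neg (by simp [hx]), ih x]
      simp [dedup, hx.symm]
    · rw [if_pos hx]
      by_cases hp : cur ≠ (negRecip x).1 ∧ cur ≠ (negRecip x).2
      · rw [if_pos hp]
        have hne : x ≠ cur := fun e => hx e.symm
        simp [dedup, hne]
      · rw [if_neg hp, loopC_two xs x (1 + 1) (by norm_num)]
        have hne : x ≠ cur := fun e => hx e.symm
        simp [dedup, hne]

theorem loopC_zero (tail : List (Int × Int)) :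
    ∀ (cur : Int × Int),
      loopC cur tail 0 (decide (tail = [])) =
        (match dedup cur tail with
          | [] => true
          | [x] => decide (cur = (negRecip x).1 ∨ cur = (negRecip x).2)
          | _ :: _ :: _ => false) := by
  induction tail with
  | nil => intro cur; simp [loopC, dedup]
  | cons x xs ih =>
    intro cur
    have happ0 : (if (0:Int) < 2 ∧ xs = [] then true else decide (x :: xs = [])) = decide (xs = []) := by
      split_ifs with h
      · simp [h.2]
      · have hne : xs ≠ [] := fun hh => h ⟨by norm_num, hh⟩
        simp [hne]
    have happ1 : (if (0:Int) + 1 < 2 ∧ xs = [] then true else decide (x :: xs = [])) = decide (xs = []) := by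
      split_ifs with h
      · simp [h.2]
      · have hne : xs ≠ [] := fun hh => h ⟨by norm_num, hh⟩
        simp [hne]
    simp only [loopC]
    rw [happ0, happ1]
    by_cases hx : cur = x
    · rw [if_neg (by simp [hx]), ih x]
      have : dedup cur (x :: xs) = dedup x xs := by simp [dedup, hx.symm]
      rw [this, hx]
    · rw [if_pos hx]
      have hne : x ≠ cur := fun e => hx e.symm
      have hded : dedup cur (x :: xs) = x :: dedup x xs := by simp [dedup, hne]
      by_cases hp : cur ≠ (negRecip x).1 ∧ cur ≠ (negRecip x).2
      · rw [if_pos hp, hded]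
        cases hd : dedup x xs with
        | nil =>
          simp only [hd]
          simp [hp.1, hp.2]
        | cons y ys => simp [hd]
      · rw [if_neg hp, show (0:Int) + 1 = 1 by norm_num, loopC_one xs x, hded]
        cases hd : dedup x xs with
        | nil =>
          simp only [hd, decide_true]
          rcases not_and_or.mp hp with h | h
          · simp [not_not.mp h]
          · simp [not_not.mp h]
        | cons y ys => simp [hd]
theorem go_eq (paths0 : List (List (Int × Int))) (rem : List (List (Int × Int))) :
    ∀ (acc : List (List (Int × Int))), goA paths0 rem acc = goB paths0 rem acc := by
  induction rem with
  | nil => intro acc; rfl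
  | cons path rest ih =>
    intro acc
    simp only [goA, goB, diff_eq]
    by_cases hlen : ((diffsB path).length : Int) - 1 < 1
    · rw [if_pos hlen, if_pos (show (diffsB path).length < 2 by omega)]
    · rw [if_neg hlen, if_neg (show ¬ (diffsB path).length < 2 by omega)]
      have h2 : 2 ≤ (diffsB path).length := by omega
      obtain ⟨d0, tail0, h0⟩ : ∃ d0 tail0, diffsB path = d0 :: tail0 := by
        cases hd : diffsB path with
        | nil => rw [hd] at h2; simp at h2
        | cons a b => exact ⟨a, b, rfl⟩
      obtain ⟨d1, ds, h1⟩ : ∃ d1 ds, tail0 = d1 :: ds := by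
        cases hd : tail0 with
        | nil => rw [hd] at h0; rw [h0] at h2; simp at h2
        | cons a b => exact ⟨a, b, rfl⟩
      rw [h1] at h0
      -- A's decision via the structural loop
      have hA : innerA (diffsB path)
          (PySem.List.pyRange 0 (((diffsB path).length : Int) - 1) 1) 0 false =
          (match dedup d0 (d1 :: ds) with
            | [] => true
            | [x] => decide (d0 = (negRecip x).1 ∨ d0 = (negRecip x).2)
            | _ :: _ :: _ => false) := by
        have eR : PySem.List.pyRange 0 (((diffsB path).length : Int) - 1) 1
            = PySem.List.pyRange ((([] : List (Int × Int)).length : Nat) : Int)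
                (((([] : List (Int × Int)).length : Nat) : Int) + (((d1 :: ds).length : Nat) : Int)) 1 := by
          rw [h0]
          push_cast [List.length_cons, List.length_nil]
          norm_num
        have e2 : diffsB path = [] ++ d0 :: d1 :: ds := by rw [h0]; rfl
        rw [eR, e2]
        rw [innerA_eq_loopC (d1 :: ds) [] d0 0 false,
            show (false : Bool) = decide ((d1 :: ds) = []) by simp,
            loopC_zero (d1 :: ds) d0]
        rfl
      rw [hA, h0, runsB_cons]
      -- compare the two branch decisions case by case on the collapsed runs
      cases hd : dedup d0 (d1 :: ds) with
      | nil =>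
        simp only [hd]
        rw [if_pos (by simp)]
        exact ih (acc ++ [path])
      | cons y ys =>
        cases ys with
        | nil =>
          simp only [hd]
          by_cases hp : d0 = (negRecip y).1 ∨ d0 = (negRecip y).2
          · rw [if_pos (by simp [hp]), if_pos (by simp; exact hp)]
            exact ih (acc ++ [path])
          · rw [if_neg (by simp [hp]), if_neg (by simp; exact not_or.mp hp)]
            exact ih acc
        | cons z zs =>
          simp only [hd]
          rw [if_neg (by simp), if_neg (by simp)]
          exact ih acc

-- ===== VERDICT (by name: the statement is the Claim_ definition above) =====
theorem retpath_spec : Claim_equal_retpath := by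
  intro paths _
  unfold Spec_retpath retpath retpath_alt
  exact go_eq paths paths []
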